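-- pv_equiv track=rewrite | github.com/Aaron349899401/myprograms | ccc/ccc_2sgt7.py | max_coverage
-- ===== SOURCE A (Python) =====
-- import bisect
--
-- def max_coverage(intervals):
--     # Sort by end time
--     intervals.sort(key=lambda x: x[1])
--     starts = [l for l, r in intervals]
--     ends = [r for l, r in intervals]
--
--     n = len(intervals)
--     dp = [0] * (n + 1)
--
--     for i in range(1, n + 1):
--         l, r = intervals[i-1]
--         length = r - l
--
--         # Find the last interval that ends <= l
--         j = bisect.bisect_right(ends, l) - 1
--
--         # Option 1: skip interval i
--         # Option 2: take interval i + best before it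
--         dp[i] = max(dp[i-1], length + dp[j+1])
--
--     return dp[n]
-- ===== SOURCE B (Python) =====
-- def max_coverage(intervals):
--     # Sort by end time (in place, like the original)
--     intervals.sort(key=lambda x: x[1])
--     best = 0
--     hist = []  # (end, best coverage using intervals processed so far), ends nondecreasing
--     for l, r in intervals:
--         prev = 0
--         for e, b in hist:
--             if e <= l:
--                 prev = b
--             else:
--                 break
--         best = max(best, (r - l) + prev)
--         hist.append((r, best))
--     return best
-- ===== Notes on version B (the rewrite author's own statement) =====
-- stated objective: alternative
-- what changed: Replaces the index-addressed dp array with bisect_right predecessor search by a single fold that carries a running best and a history list of (end, best) pairs, finding each interval's predecessor value by a linear scan of the sorted history; no dp array, no bisect, no index arithmetic.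
import Mathlib
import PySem

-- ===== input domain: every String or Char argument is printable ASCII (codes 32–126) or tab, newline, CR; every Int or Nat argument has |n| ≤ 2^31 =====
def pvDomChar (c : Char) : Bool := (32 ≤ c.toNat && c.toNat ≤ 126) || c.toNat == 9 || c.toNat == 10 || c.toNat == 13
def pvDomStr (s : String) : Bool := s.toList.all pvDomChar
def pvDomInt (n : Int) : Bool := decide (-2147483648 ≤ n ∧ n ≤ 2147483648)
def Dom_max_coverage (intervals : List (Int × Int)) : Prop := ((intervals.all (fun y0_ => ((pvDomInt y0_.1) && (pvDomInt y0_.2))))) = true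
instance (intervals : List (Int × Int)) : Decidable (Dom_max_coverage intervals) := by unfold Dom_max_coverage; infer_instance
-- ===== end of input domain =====

-- B replaces the dp array + bisect with a fold carrying a running best and a history list
-- scanned linearly for each interval's predecessor value (alternative decomposition, same results).
-- Both A and B sort the argument list in place in Python; the equivalence proved here is about the return value.

-- ===== PORT A =====
def max_coverage (intervals : List (Int × Int)) : Int :=
  let sortedIv := PySem.List.sorted intervals (fun x => x.2)
  let starts := sortedIv.map (fun p => p.1)
  let ends := sortedIv.map (fun p => p.2)
  let n := sortedIv.length
  let dp0 : List Int := List.replicate (n + 1) 0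
  let dp := (PySem.List.pyRange 1 ((n : Int) + 1) 1).foldl
    (fun dp i =>
      let p := PySem.List.pyGetD sortedIv (i - 1) (0, 0)
      let length := p.2 - p.1
      let j : Int := (PySem.List.bisectRight ends p.1 : Int) - 1
      PySem.List.pySetD dp i
        (max (PySem.List.pyGetD dp (i - 1) 0) (length + PySem.List.pyGetD dp (j + 1) 0)))
    dp0
  let _ := starts
  PySem.List.pyGetD dp (n : Int) 0

-- ===== PORT B =====
-- linear back-compatible scan: last b in hist whose end e ≤ l (break at first e > l)
def bestPrev (hist : List (Int × Int)) (l : Int) (prev : Int) : Int :=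
  match hist with
  | [] => prev
  | (e, b) :: t => if e ≤ l then bestPrev t l b else prev

def max_coverage_alt (intervals : List (Int × Int)) : Int :=
  let s := PySem.List.sorted intervals (fun x => x.2)
  (s.foldl
    (fun (st : Int × List (Int × Int)) p =>
      let prev := bestPrev st.2 p.1 0
      let best := max st.1 (p.2 - p.1 + prev)
      (best, st.2 ++ [(p.2, best)]))
    (0, [])).1

-- ===== PRECONDITION & SPEC =====
def Spec_max_coverage (intervals : List (Int × Int)) (out : Int) : Prop := out = max_coverage_alt intervals
instance (intervals : List (Int × Int)) (out : Int) : Decidable (Spec_max_coverage intervals out) := by unfold Spec_max_coverage; infer_instance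

-- ===== CLAIM (what is proved, stated in full; the proofs are below) =====
def Claim_equal_max_coverage : Prop := ∀ (intervals : List (Int × Int)), Dom_max_coverage intervals → Spec_max_coverage intervals (max_coverage intervals)

-- ===== LEMMAS AND PROOFS =====

-- number of elements in the initial block ≤ l
def pvCnt : List Int → Int → Nat
  | [], _ => 0
  | e :: t, l => if e ≤ l then pvCnt t l + 1 else 0

theorem pvCnt_le_length (xs : List Int) (l : Int) : pvCnt xs l ≤ xs.length := by
  induction xs with
  | nil => simp [pvCnt]
  | cons e t ih => simp only [pvCnt, List.length_cons]; split <;> omega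

theorem pvCnt_lt_imp (xs : List Int) (l : Int) :
    ∀ j (hj : j < xs.length), j < pvCnt xs l → xs[j] ≤ l := by
  induction xs with
  | nil => intro j hj; simp at hj
  | cons e t ih =>
    intro j hj hlt
    simp only [pvCnt] at hlt
    by_cases he : e ≤ l
    · simp [he] at hlt
      cases j with
      | zero => simpa
      | succ k => simpa using ih k (by simpa using hj) (by omega)
    · simp [he] at hlt

theorem pvCnt_at (xs : List Int) (l : Int) (h : pvCnt xs l < xs.length) :
    l < xs[pvCnt xs l] := by
  induction xs with
  | nil => simp at h
  | cons e t ih =>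
    simp only [pvCnt] at h ⊢
    by_cases he : e ≤ l
    · simp only [he, if_true] at h ⊢
      simpa using ih (by simpa using h)
    · simp only [he, if_false]
      simpa using lt_of_not_ge he

theorem bisect_eq_cnt (xs : List Int) (l : Int) (hs : xs.Pairwise (· ≤ ·)) :
    PySem.List.bisectRight xs l = pvCnt xs l := by
  obtain ⟨hle, hlt, hgt⟩ := PySem.List.bisectRight_spec xs l hs
  by_contra hne
  rcases lt_or_gt_of_ne hne with h | h
  · -- bisect < cnt: xs[bisect] ≤ l but spec says l < xs[bisect]
    have hb : PySem.List.bisectRight xs l < xs.length :=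
      lt_of_lt_of_le h (pvCnt_le_length xs l)
    exact absurd (pvCnt_lt_imp xs l _ hb h) (not_le.mpr (hgt _ hb le_rfl))
  · -- cnt < bisect: l < xs[cnt] by pvCnt_at, but spec says xs[cnt] ≤ l
    have hc : pvCnt xs l < xs.length := lt_of_lt_of_le h hle
    exact absurd (hlt _ hc h) (not_le.mpr (pvCnt_at xs l hc))

theorem bestPrev_eq_getD (hist : List (Int × Int)) (l : Int) (prev : Int) :
    bestPrev hist l prev
      = (prev :: hist.map Prod.snd).getD (pvCnt (hist.map Prod.fst) l) 0 := by
  induction hist generalizing prev with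
  | nil => simp [bestPrev, pvCnt]
  | cons p t ih =>
    obtain ⟨e, b⟩ := p
    simp only [bestPrev, List.map_cons, pvCnt]
    by_cases he : e ≤ l
    · simp only [he, if_true]
      simpa using ih b
    · simp [he]

theorem pvCnt_take (xs : List Int) (l : Int) (k : Nat) :
    pvCnt (xs.take k) l = min (pvCnt xs l) k := by
  induction xs generalizing k with
  | nil => simp [pvCnt]
  | cons e t ih =>
    cases k with
    | zero => simp [pvCnt]
    | succ m =>
      simp only [List.take_succ_cons, pvCnt]
      by_cases he : e ≤ l
      · simp only [he, if_true, ih m]; omega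
      · simp [he]

theorem pairwise_le_getLast {x : Int} {xs : List Int} (h : (x :: xs).Pairwise (· ≤ ·)) :
    ∀ y ∈ x :: xs, y ≤ (x :: xs).getLast (List.cons_ne_nil x xs) := by
  intro y hy
  have hl : (x :: xs).getLast (List.cons_ne_nil x xs)
      = (x :: xs)[(x :: xs).length - 1] := List.getLast_eq_getElem _
  obtain ⟨j, hj, hyj⟩ := List.mem_iff_getElem.mp hy
  rw [hl, ← hyj]
  by_cases hlt : j < (x :: xs).length - 1
  · exact (List.pairwise_iff_getElem.mp h) j _ hj (by omega) hlt
  · have hj' : j = (x :: xs).length - 1 := by omega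
    subst hj'
    exact le_rfl

def stepB (st : Int × List (Int × Int)) (p : Int × Int) : Int × List (Int × Int) :=
  let prev := bestPrev st.2 p.1 0
  let best := max st.1 (p.2 - p.1 + prev)
  (best, st.2 ++ [(p.2, best)])

def stepA (s : List (Int × Int)) (dp : List Int) (n : Int) : List Int :=
  let p := PySem.List.pyGetD s (n - 1) (0, 0)
  let length := p.2 - p.1
  let j : Int := (PySem.List.bisectRight (s.map Prod.snd) p.1 : Int) - 1
  PySem.List.pySetD dp n
    (max (PySem.List.pyGetD dp (n - 1) 0) (length + PySem.List.pyGetD dp (j + 1) 0))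

-- the joint loop invariant, by induction on the prefix length
theorem main_inv (s : List (Int × Int)) (hs : (s.map Prod.snd).Pairwise (· ≤ ·))
    (i : Nat) (hi : i ≤ s.length) :
    (PySem.List.pyRange 1 ((i : Int) + 1) 1).foldl (stepA s) (List.replicate (s.length + 1) 0)
        = (0 :: ((s.take i).foldl stepB (0, [])).2.map Prod.snd)
            ++ List.replicate (s.length - i) 0
      ∧ ((s.take i).foldl stepB (0, [])).2.map Prod.fst = (s.map Prod.snd).take i
      ∧ ((s.take i).foldl stepB (0, [])).2.length = i
      ∧ (0 :: ((s.take i).foldl stepB (0, [])).2.map Prod.snd).Pairwise (· ≤ ·)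
      ∧ ((s.take i).foldl stepB (0, [])).1
          = (0 :: ((s.take i).foldl stepB (0, [])).2.map Prod.snd).getLast
              (List.cons_ne_nil _ _) := by
  induction i with
  | zero =>
    rw [show ((0 : Nat) : Int) + 1 = 1 by norm_num, PySem.List.pyRange_one_eq_nil le_rfl]
    simp [List.replicate_succ]
  | succ k ih =>
    have hk : k < s.length := by omega
    obtain ⟨h1, h2, h3, h4, h5⟩ := ih (by omega)
    set st := (s.take k).foldl stepB ((0 : Int), ([] : List (Int × Int))) with hst
    set vs := st.2.map Prod.snd with hvs
    set dp := (PySem.List.pyRange 1 ((k : Int) + 1) 1).foldl (stepA s)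
        (List.replicate (s.length + 1) 0) with hdp
    set l := (s[k]).1 with hl
    set r := (s[k]).2 with hr
    set ends := s.map Prod.snd with hends
    have hendslen : ends.length = s.length := by simp [hends]
    have hvslen : (0 :: vs).length = k + 1 := by simp [hvs, h3]
    -- B-side one step
    have hBfold : (s.take (k + 1)).foldl stepB (0, []) = stepB st s[k] := by
      rw [← List.take_concat_get hk, List.concat_eq_append, List.foldl_append]
      simp [hst]
    -- A-side one step
    have hAfold :
        (PySem.List.pyRange 1 (((k + 1 : Nat) : Int) + 1) 1).foldl (stepA s)
            (List.replicate (s.length + 1) 0)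
          = stepA s dp ((k : Int) + 1) := by
      have hsplit : PySem.List.pyRange 1 (((k + 1 : Nat) : Int) + 1) 1
          = PySem.List.pyRange 1 ((k : Int) + 1) 1 ++ [(k : Int) + 1] := by
        push_cast
        exact PySem.List.pyRange_one_succ_right (by omega)
      rw [hsplit, List.foldl_append]
      rfl
    -- the interval read by A
    have hp : PySem.List.pyGetD s (((k : Nat) : Int)) ((0 : Int), (0 : Int)) = s[k] := by
      rw [PySem.List.pyGetD_natCast, List.getD_eq_getElem _ _ hk]
    have hidx1 : ((k : Int) + 1) - 1 = ((k : Nat) : Int) := by ring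
    -- dp read at index k is the current best
    have hbest0 : (0 : Int) ≤ st.1 := by
      rw [h5]
      exact pairwise_le_getLast h4 0 (by simp)
    have hdpk : PySem.List.pyGetD dp ((k : Int)) 0 = st.1 := by
      rw [PySem.List.pyGetD_natCast, h1, List.getD_append _ _ _ k (by omega),
        List.getD_eq_getElem _ _ (by omega), h5, List.getLast_eq_getElem]
      congr 1
      omega
    set m := PySem.List.bisectRight ends l with hm
    have hm_cnt : m = pvCnt ends l := bisect_eq_cnt ends l hs
    have hm_le : m ≤ s.length := by
      rw [hm_cnt]; simpa [hendslen] using pvCnt_le_length ends l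
    -- prev as a lookup into 0 :: vs
    have hprev : bestPrev st.2 l 0 = (0 :: vs).getD (min m k) 0 := by
      rw [bestPrev_eq_getD, h2, pvCnt_take, ← hm_cnt]
    -- the two new best values agree
    have hval :
        max (PySem.List.pyGetD dp ((k : Int)) 0)
            ((r - l) + PySem.List.pyGetD dp (((m : Int) - 1) + 1) 0)
          = max st.1 ((r - l) + bestPrev st.2 l 0) := by
      have hidx : ((m : Int) - 1) + 1 = ((m : Nat) : Int) := by ring
      rw [hdpk, hidx, PySem.List.pyGetD_natCast, h1, hprev]
      by_cases hcase : m ≤ k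
      · rw [List.getD_append _ _ _ m (by omega), show min m k = m by omega]
      · -- degenerate interval: r ≤ l, A reads a 0 ahead, B reads the running best
        have hrl : r ≤ l := by
          have := pvCnt_lt_imp ends l k (by omega) (by omega)
          simpa [hends, hr] using this
        have hzero : ((0 :: vs) ++ List.replicate (s.length - k) (0 : Int)).getD m 0 = 0 := by
          rw [List.getD_append_right _ _ _ m (by omega)]
          have hlt : m - (0 :: vs).length < (List.replicate (s.length - k) (0 : Int)).length := by
            simp only [List.length_replicate]; omega
          rw [List.getD_eq_getElem _ _ hlt, List.getElem_replicate]
        rw [hzero, show min m k = k by omega,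
          List.getD_eq_getElem _ _ (by omega), show ((0 :: vs)[k]'(by omega)) =
            (0 :: vs).getLast (List.cons_ne_nil _ _) by
              rw [List.getLast_eq_getElem]; exact le_of_eq (by congr 1; omega) |>.antisymm
                (le_of_eq (by congr 1; omega)), ← h5]
        have e1 : max st.1 (r - l + 0) = st.1 := max_eq_left (by omega)
        have e2 : max st.1 (r - l + st.1) = st.1 := max_eq_left (by omega)
        rw [e1, e2]
    -- assemble the five conjuncts
    rw [hAfold, hBfold]
    have hstepB : stepB st s[k] = (max st.1 ((r - l) + bestPrev st.2 l 0),
        st.2 ++ [(r, max st.1 ((r - l) + bestPrev st.2 l 0))]) := rfl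
    set bestNew := max st.1 ((r - l) + bestPrev st.2 l 0) with hbn
    have hstepA : stepA s dp ((k : Int) + 1) = dp.set (k + 1) bestNew := by
      simp only [stepA]
      rw [hidx1, hp,
        show ((k : Int) + 1) = (((k + 1 : Nat)) : Int) from by push_cast; ring,
        PySem.List.pySetD_natCast]
      congr 1
    rw [hstepA, hstepB]
    have hmapsnd : List.map Prod.snd (st.2 ++ [(r, bestNew)]) = vs ++ [bestNew] := by
      simp [hvs]
    have hsetdp : dp.set (k + 1) bestNew
        = (0 :: (vs ++ [bestNew])) ++ List.replicate (s.length - (k + 1)) 0 := by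
      rw [h1, show s.length - k = (s.length - (k + 1)) + 1 by omega, List.replicate_succ,
        List.set_append_right _ _ (by omega), show k + 1 - (0 :: vs).length = 0 by omega]
      simp
    refine ⟨?_, ?_, by simp [h3], ?_, ?_⟩
    · rw [hsetdp]
      simp [hmapsnd]
    · rw [List.map_append, h2]
      rw [← List.take_concat_get (show k < ends.length by omega), List.concat_eq_append]
      simp [hends, hr]
    · rw [hmapsnd]
      show ((0 :: vs) ++ [bestNew]).Pairwise (· ≤ ·)
      rw [List.pairwise_append]
      refine ⟨h4, by simp, ?_⟩
      intro a ha b hb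
      simp only [List.mem_singleton] at hb
      subst hb
      calc a ≤ (0 :: vs).getLast (List.cons_ne_nil _ _) := pairwise_le_getLast h4 a ha
        _ = st.1 := h5.symm
        _ ≤ bestNew := le_max_left _ _
    · simp only [hmapsnd]
      show bestNew = ((0 :: vs) ++ [bestNew]).getLast (List.cons_ne_nil _ _)
      exact (List.getLast_concat).symm

theorem max_coverage_spec : Claim_equal_max_coverage := by
  intro intervals _
  unfold Spec_max_coverage
  set s := PySem.List.sorted intervals (fun x => x.2) with hss
  have hA : max_coverage intervals
      = PySem.List.pyGetD
          ((PySem.List.pyRange 1 ((s.length : Int) + 1) 1).foldl (stepA s)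
            (List.replicate (s.length + 1) 0))
          ((s.length : Int)) 0 := rfl
  have hB : max_coverage_alt intervals = (s.foldl stepB (0, [])).1 := rfl
  have hs : (s.map Prod.snd).Pairwise (· ≤ ·) := by
    simpa using PySem.List.sorted_map_key_pairwise intervals (fun x => x.2)
  obtain ⟨h1, h2, h3, h4, h5⟩ := main_inv s hs s.length le_rfl
  rw [List.take_length] at h1 h3 h5
  rw [hA, hB, h1, PySem.List.pyGetD_natCast]
  simp only [Nat.sub_self, List.replicate_zero, List.append_nil]
  rw [List.getD_eq_getElem _ _ (by simp [h3]), h5, List.getLast_eq_getElem]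
  congr 1
  simp [h3]
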